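-- pv_equiv track=rewrite | github.com/PatrickRose/advent-of-code | python/2019/DaySeventeen.py | list_replace
-- ===== SOURCE A (Python) =====
-- def list_replace(base, search, replace):
--     to_return = base.copy()
--     i = 0
--     k = len(search)
--
--     while i < len(to_return):
--         if to_return[i:i + k] == search:
--             to_return = to_return[:i] + replace + to_return[i + k:]
--         else:
--             i += 1
--
--     return to_return
-- ===== SOURCE B (Python) =====
-- def list_replace(base, search, replace):
--     # Stack/output cursor: splice locally on a match instead of rebuilding the
--     # whole list; settled elements move to `out` and are never rescanned from scratch.
--     k = len(search)
--     srev = search[::-1]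
--     rrev = replace[::-1]
--     stack = base[::-1]          # top of stack = current scan position
--     out = []
--     while stack:
--         if stack[-k:] == srev:
--             del stack[-k:]
--             stack += rrev
--         else:
--             out.append(stack.pop())
--     return out
-- ===== Notes on version B (the rewrite author's own statement) =====
-- stated objective: faster
-- what changed: Instead of rebuilding the whole list on every match (to_return[:i]+replace+to_return[i+k:]), B keeps a settled output list and a reversed-suffix stack and splices only at the stack top, so each match touches O(k) elements instead of O(n).
import Mathlib
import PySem

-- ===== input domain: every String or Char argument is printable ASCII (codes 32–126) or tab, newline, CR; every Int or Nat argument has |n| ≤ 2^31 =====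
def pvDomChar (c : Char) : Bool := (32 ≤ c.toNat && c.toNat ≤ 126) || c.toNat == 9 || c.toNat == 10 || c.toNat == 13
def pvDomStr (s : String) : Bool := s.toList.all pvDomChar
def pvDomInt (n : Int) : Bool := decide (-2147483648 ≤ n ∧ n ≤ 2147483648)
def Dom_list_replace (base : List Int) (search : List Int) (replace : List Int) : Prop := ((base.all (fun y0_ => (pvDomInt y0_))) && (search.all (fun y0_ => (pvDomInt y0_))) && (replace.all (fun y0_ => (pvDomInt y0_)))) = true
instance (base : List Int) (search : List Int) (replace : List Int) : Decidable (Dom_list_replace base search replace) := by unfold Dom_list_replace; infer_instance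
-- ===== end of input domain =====

-- B replaces A's full-list reconstruction on every match by a settled-output list plus a
-- reversed-suffix stack spliced only at its top (objective: faster — each match touches
-- O(len(search)) elements where A rebuilds the whole list).
-- Both loops carry a fuel guard that only makes the recursion total; on every input
-- admitted by Pre_ the Python loop runs fewer iterations than the fuel provides.

-- ===== PORT A =====
def list_replaceLoopA (search replace : List Int) (k : Int) : Nat → Int → List Int → List Int
  | 0, _, L => L
  | fuel + 1, i, L =>
    if i < (L.length : Int) then
      if PySem.List.slice L (some i) (some (i + k)) = search then
        list_replaceLoopA search replace k fuel i
          (PySem.List.slice L none (some i) ++ replace ++ PySem.List.slice L (some (i + k)) none)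
      else
        list_replaceLoopA search replace k fuel (i + 1) L
    else L

def list_replace (base : List Int) (search : List Int) (replace : List Int) : List Int :=
  list_replaceLoopA search replace (search.length : Int)
    ((base.length + 1) * (replace.length + search.length + 4)) 0 base

-- ===== PORT B =====
def list_replaceLoopB (srev rrev : List Int) (k : Int) : Nat → List Int → List Int → List Int
  | 0, out, stack => out ++ stack.reverse
  | fuel + 1, out, stack =>
    if stack = [] then out
    else if PySem.List.slice stack (some (-k)) none = srev then
      list_replaceLoopB srev rrev k fuel out (PySem.List.slice stack none (some (-k)) ++ rrev)
    else
      list_replaceLoopB srev rrev k fuel (out ++ [stack.getLast!]) stack.dropLast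

def list_replace_alt (base : List Int) (search : List Int) (replace : List Int) : List Int :=
  list_replaceLoopB search.reverse replace.reverse (search.length : Int)
    ((base.length + 1) * (replace.length + search.length + 4)) [] base.reverse

-- ===== PRECONDITION & SPEC =====
-- Pre_ excludes exactly the inputs on which A's while-loop never terminates: an empty
-- search with a nonempty base, or a base containing an occurrence of search whose
-- replacement recreates search forever (replace == search, or len(replace) > len(search)
-- with search occurring inside replace). A returns no value on any excluded input.
def Pre_list_replace (base : List Int) (search : List Int) (replace : List Int) : Prop :=
  base = [] ∨
    (search ≠ [] ∧
      (¬ search <:+: base ∨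
        (replace ≠ search ∧ (replace.length ≤ search.length ∨ ¬ search <:+: replace))))
instance (base : List Int) (search : List Int) (replace : List Int) : Decidable (Pre_list_replace base search replace) := by unfold Pre_list_replace; infer_instance

def pvWitness_list_replace : List Int × List Int × List Int := ([1, 2, 3, 2], [2], [7, 7])

def Spec_list_replace (base : List Int) (search : List Int) (replace : List Int) (out : List Int) : Prop := out = list_replace_alt base search replace
instance (base : List Int) (search : List Int) (replace : List Int) (out : List Int) : Decidable (Spec_list_replace base search replace out) := by unfold Spec_list_replace; infer_instance

-- ===== CLAIM (what is proved, stated in full; the proofs are below) =====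
def Claim_equal_list_replace : Prop := ∀ (base : List Int) (search : List Int) (replace : List Int), Dom_list_replace base search replace → Pre_list_replace base search replace → Spec_list_replace base search replace (list_replace base search replace)

-- ===== LEMMAS AND PROOFS =====

-- The two loops simulate each other step by step: A's state (i, L) corresponds to B's state
-- (out, stack) via i = out.length, L = out ++ stack.reverse (equal fuel on both sides).
theorem pv_getLast!_concat (t : List Int) (x : Int) : (t ++ [x]).getLast! = x := by
  induction t with
  | nil => rfl
  | cons a s ih => simp [List.getLast!]

theorem loopA_eq_loopB (search replace : List Int) (hk : search ≠ []) :
    ∀ (fuel : Nat) (out suf : List Int),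
      list_replaceLoopA search replace (search.length : Int) fuel (out.length : Int) (out ++ suf)
        = list_replaceLoopB search.reverse replace.reverse (search.length : Int) fuel out suf.reverse := by
  intro fuel
  induction fuel with
  | zero => intro out suf; simp [list_replaceLoopA, list_replaceLoopB]
  | succ f ih =>
    intro out suf
    have hk0 : 0 < search.length := List.length_pos_of_ne_nil hk
    cases suf with
    | nil => simp [list_replaceLoopA, list_replaceLoopB]
    | cons x t =>
      have hlen : (out.length : Int) < ((out ++ x :: t).length : Int) := by
        simp [List.length_append]
      have hstack : (x :: t).reverse ≠ [] := by simp
      -- the two match conditions coincide: both say `take k suffix = search`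
      have hcondA : (PySem.List.slice (out ++ x :: t) (some (out.length : Int))
            (some ((out.length : Int) + (search.length : Int))) = search)
          ↔ ((x :: t).take search.length = search) := by
        rw [PySem.List.slice_natCast_add, List.drop_left]
      have hcondB : (PySem.List.slice ((x :: t).reverse) (some (-(search.length : Int))) none
            = search.reverse)
          ↔ ((x :: t).take search.length = search) := by
        rw [PySem.List.slice_from_neg_natCast _ _ hk0, List.length_reverse, List.drop_reverse,
          List.reverse_inj]
        have hmin : (x :: t).length - ((x :: t).length - search.length)
            = min search.length (x :: t).length := by omega
        rw [hmin, ← List.take_eq_take_min]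
      simp only [list_replaceLoopA, list_replaceLoopB, if_pos hlen, if_neg hstack]
      by_cases hc : (x :: t).take search.length = search
      · rw [if_pos (hcondA.mpr hc), if_pos (hcondB.mpr hc)]
        have hkle : search.length ≤ (x :: t).length := by
          have h := congrArg List.length hc
          simp only [List.length_take] at h
          omega
        have hcast : (out.length : Int) + (search.length : Int)
            = ((out.length + search.length : Nat) : Int) := by push_cast; ring
        have hA : PySem.List.slice (out ++ x :: t) none (some (out.length : Int)) ++ replace ++
              PySem.List.slice (out ++ x :: t) (some ((out.length : Int) + (search.length : Int))) none
            = out ++ (replace ++ (x :: t).drop search.length) := by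
          rw [hcast, PySem.List.slice_to_natCast, PySem.List.slice_from_natCast, List.take_left,
            List.drop_length_add_append, List.append_assoc]
        have hB : PySem.List.slice ((x :: t).reverse) none (some (-(search.length : Int))) ++
              replace.reverse = (replace ++ (x :: t).drop search.length).reverse := by
          have harith : (x :: t).length - ((x :: t).length - search.length) = search.length := by
            omega
          rw [PySem.List.slice_to_neg_natCast _ _ hk0, List.length_reverse, List.take_reverse,
            harith, List.reverse_append]
        rw [hA, hB]
        exact ih out (replace ++ (x :: t).drop search.length)
      · rw [if_neg (fun h => hc (hcondA.mp h)), if_neg (fun h => hc (hcondB.mp h))]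
        have h1 : (out.length : Int) + 1 = (((out ++ [x]).length : Nat) : Int) := by
          simp [List.length_append]
        have h2 : out ++ x :: t = (out ++ [x]) ++ t := by simp
        have h3 : out ++ [((x :: t).reverse).getLast!] = out ++ [x] := by
          rw [show (x :: t).reverse = t.reverse ++ [x] from by simp, pv_getLast!_concat]
        have h4 : ((x :: t).reverse).dropLast = t.reverse := by
          rw [show (x :: t).reverse = t.reverse ++ [x] from by simp, List.dropLast_concat]
        rw [h1, h2, h3, h4]
        exact ih (out ++ [x]) t

theorem loopA_nil (search replace : List Int) (k : Int) (fuel : Nat) :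
    list_replaceLoopA search replace k fuel 0 [] = [] := by
  cases fuel <;> simp [list_replaceLoopA]

theorem loopB_nil (srev rrev : List Int) (k : Int) (fuel : Nat) :
    list_replaceLoopB srev rrev k fuel [] [] = [] := by
  cases fuel <;> simp [list_replaceLoopB]

theorem list_replace_spec' (base search replace : List Int) (hk : search ≠ []) :
    list_replace base search replace = list_replace_alt base search replace := by
  have h := loopA_eq_loopB search replace hk
    ((base.length + 1) * (replace.length + search.length + 4)) [] base
  simpa [list_replace, list_replace_alt] using h

-- ===== VERDICT (by name: the statement is the Claim_ definition above) =====
theorem list_replace_spec : Claim_equal_list_replace := by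
  intro base search replace _ hpre
  unfold Spec_list_replace
  rcases hpre with hb | hpre
  · subst hb
    simp [list_replace, list_replace_alt, loopA_nil, loopB_nil]
  · exact list_replace_spec' base search replace hpre.1
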